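-- pv_equiv track=rewrite | github.com/PavelKevor/formal_languages | src/regular_language_recognizer.py | der_by_symbol
-- ===== SOURCE A (Python) =====
-- def Nullable(regex):
--     result = []
--     if regex == 'eps':
--         return True
--     elif list(set(regex) & set(['.', '|', '*'])) == []:
--         return False
--     elif '|' in regex:
--         regexes = regex.split('|', 1)
--         return Nullable(regexes[0]) or Nullable(regexes[1])
--     elif '.' in regex:
--         regexes = regex.split('.', 1)
--         return Nullable(regexes[0]) and Nullable(regexes[1])
--     elif '*' in regex:
--         return True
--
-- def der_by_symbol(regex, s):
--     if list(set(regex) & set(['.', '|', '*'])) == []: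
--         if regex != s:
--             return 'Null'
--         else:
--             return 'eps'
--     elif '|' in regex:
--         regexes = regex.split('|', 1)
--         r1 = regexes[0]
--         r2 = regexes[1]
--         return der_by_symbol(r1, s) + '|' + der_by_symbol(r2, s)
--     elif '.' in regex:
--         regexes = regex.split('.', 1)
--         r1 = regexes[0]
--         r2 = regexes[1]
--         if Nullable(r1):
--             return der_by_symbol(r1, s)+'.'+r2+'|' + der_by_symbol(r2, s)
--         else:
--             return der_by_symbol(r1, s)+'.'+r2
--
--     elif '*' in regex:
--         return der_by_symbol(regex[:-1], s) + '.' + regex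
-- ===== SOURCE B (Python) =====
-- # AST-based re-implementation: parse -> derivative over the tree -> serialize.
-- def _parse(r):
--     if not (set(r) & {'.', '|', '*'}):
--         return ('sym', r)
--     if '|' in r:
--         a, b = r.split('|', 1)
--         return ('alt', _parse(a), _parse(b))
--     if '.' in r:
--         a, b = r.split('.', 1)
--         return ('cat', _parse(a), _parse(b))
--     return ('star', _parse(r[:-1]), r[-1])
--
-- def _null(t):
--     tag = t[0]
--     if tag == 'sym':
--         return t[1] == 'eps'
--     if tag == 'alt':
--         return _null(t[1]) or _null(t[2])
--     if tag == 'cat':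
--         return _null(t[1]) and _null(t[2])
--     return True
--
-- def _d(t, s):
--     tag = t[0]
--     if tag == 'sym':
--         return ('sym', 'eps' if t[1] == s else 'Null')
--     if tag == 'alt':
--         return ('alt', _d(t[1], s), _d(t[2], s))
--     if tag == 'cat':
--         a, b = t[1], t[2]
--         if _null(a):
--             return ('alt', ('cat', _d(a, s), b), _d(b, s))
--         return ('cat', _d(a, s), b)
--     return ('cat', _d(t[1], s), t)
--
-- def _ser(t):
--     tag = t[0]
--     if tag == 'sym':
--         return t[1]
--     if tag == 'alt':
--         return _ser(t[1]) + '|' + _ser(t[2])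
--     if tag == 'cat':
--         return _ser(t[1]) + '.' + _ser(t[2])
--     return _ser(t[1]) + t[2]
--
-- def der_by_symbol(regex, s):
--     return _ser(_d(_parse(regex), s))
-- ===== Notes on version B (the rewrite author's own statement) =====
-- stated objective: alternative
-- what changed: Replaces A's single string-recursion (re-splitting and re-scanning the regex string at every step, with Nullable re-parsing substrings) by three separate passes: parse the string into an explicit AST (sym/alt/cat/star), take the Brzozowski derivative by structural recursion on the tree with a tree-based nullability test, then serialize the derivative tree back to the identical unsimplified string format.
import Mathlib
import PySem

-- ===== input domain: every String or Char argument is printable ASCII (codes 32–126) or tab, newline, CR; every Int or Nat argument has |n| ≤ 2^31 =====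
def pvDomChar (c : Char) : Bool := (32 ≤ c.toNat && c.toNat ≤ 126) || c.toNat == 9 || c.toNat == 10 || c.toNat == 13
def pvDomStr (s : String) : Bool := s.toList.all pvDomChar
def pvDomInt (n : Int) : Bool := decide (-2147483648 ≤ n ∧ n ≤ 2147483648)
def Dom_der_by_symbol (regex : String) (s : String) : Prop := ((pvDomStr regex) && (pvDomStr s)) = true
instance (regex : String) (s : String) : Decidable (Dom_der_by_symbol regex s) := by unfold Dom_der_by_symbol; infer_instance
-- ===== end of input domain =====

-- B replaces A's single string-recursion by three passes (parse to an AST, derivative on the tree, serialize back); alternative decomposition, same output.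

-- ===== PORT A =====
-- regex.split(op, 1): the part before the first op, and the part after it
def pvSplit1 (c : Char) (l : List Char) : List Char × List Char :=
  (l.takeWhile (· ≠ c), (l.dropWhile (· ≠ c)).tail)

theorem pvSplit1_fst_lt (c : Char) (l : List Char) (h : c ∈ l) :
    (pvSplit1 c l).1.length < l.length := by
  induction l with
  | nil => cases h
  | cons x xs ih =>
    by_cases hx : x = c
    · simp [pvSplit1, hx]
    · simp only [List.mem_cons] at h
      rcases h with h | h
      · exact absurd h.symm hx
      · simpa [pvSplit1, hx] using ih h

theorem pvSplit1_snd_lt (c : Char) (l : List Char) (h : c ∈ l) :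
    (pvSplit1 c l).2.length < l.length := by
  induction l with
  | nil => cases h
  | cons x xs ih =>
    by_cases hx : x = c
    · simp [pvSplit1, hx]
    · simp only [List.mem_cons] at h
      rcases h with h | h
      · exact absurd h.symm hx
      · have := ih h
        simp only [pvSplit1, List.takeWhile_cons, List.dropWhile_cons] at *
        simp [hx] at *
        omega

theorem pvStarMem (l : List Char) (h0 : ¬¬('.' ∈ l ∨ '|' ∈ l ∨ '*' ∈ l))
    (h1 : '|' ∉ l) (h2 : '.' ∉ l) : '*' ∈ l := by tauto

theorem pvDropLast_lt (l : List Char) (h : '*' ∈ l) : l.dropLast.length < l.length := by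
  have : 0 < l.length := List.length_pos_of_ne_nil (List.ne_nil_of_mem h)
  simp [List.length_dropLast]; omega

-- Nullable, transliterated on List Char
def pvNullA (l : List Char) : Bool :=
  if l = "eps".toList then true
  else if h0 : ¬('.' ∈ l ∨ '|' ∈ l ∨ '*' ∈ l) then false
  else if h1 : '|' ∈ l then pvNullA (pvSplit1 '|' l).1 || pvNullA (pvSplit1 '|' l).2
  else if h2 : '.' ∈ l then pvNullA (pvSplit1 '.' l).1 && pvNullA (pvSplit1 '.' l).2
  else true
termination_by l.length
decreasing_by
  all_goals first
    | exact pvSplit1_fst_lt _ _ h1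
    | exact pvSplit1_snd_lt _ _ h1
    | exact pvSplit1_fst_lt _ _ h2
    | exact pvSplit1_snd_lt _ _ h2

-- der_by_symbol, transliterated on List Char
def pvDerA (l s : List Char) : List Char :=
  if h0 : ¬('.' ∈ l ∨ '|' ∈ l ∨ '*' ∈ l) then
    if l ≠ s then "Null".toList else "eps".toList
  else if h1 : '|' ∈ l then
    pvDerA (pvSplit1 '|' l).1 s ++ '|' :: pvDerA (pvSplit1 '|' l).2 s
  else if h2 : '.' ∈ l then
    if pvNullA (pvSplit1 '.' l).1 then
      pvDerA (pvSplit1 '.' l).1 s ++ '.' :: ((pvSplit1 '.' l).2 ++ '|' :: pvDerA (pvSplit1 '.' l).2 s)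
    else
      pvDerA (pvSplit1 '.' l).1 s ++ '.' :: (pvSplit1 '.' l).2
  else
    pvDerA l.dropLast s ++ '.' :: l
termination_by l.length
decreasing_by
  all_goals first
    | exact pvSplit1_fst_lt _ _ h1
    | exact pvSplit1_snd_lt _ _ h1
    | exact pvSplit1_fst_lt _ _ h2
    | exact pvSplit1_snd_lt _ _ h2
    | exact pvDropLast_lt l (pvStarMem l h0 h1 h2)

def der_by_symbol (regex : String) (s : String) : String :=
  String.ofList (pvDerA regex.toList s.toList)

-- ===== PORT B =====
inductive Rx where
  | sym : List Char → Rx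
  | alt : Rx → Rx → Rx
  | cat : Rx → Rx → Rx
  | star : Rx → Char → Rx
deriving DecidableEq, Repr

def pvParse (l : List Char) : Rx :=
  if h0 : ¬('.' ∈ l ∨ '|' ∈ l ∨ '*' ∈ l) then Rx.sym l
  else if h1 : '|' ∈ l then Rx.alt (pvParse (pvSplit1 '|' l).1) (pvParse (pvSplit1 '|' l).2)
  else if h2 : '.' ∈ l then Rx.cat (pvParse (pvSplit1 '.' l).1) (pvParse (pvSplit1 '.' l).2)
  else Rx.star (pvParse l.dropLast) (l.getLastD ' ')
termination_by l.length
decreasing_by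
  all_goals first
    | exact pvSplit1_fst_lt _ _ h1
    | exact pvSplit1_snd_lt _ _ h1
    | exact pvSplit1_fst_lt _ _ h2
    | exact pvSplit1_snd_lt _ _ h2
    | exact pvDropLast_lt l (pvStarMem l h0 h1 h2)

def pvNullB : Rx → Bool
  | .sym t => t = "eps".toList
  | .alt a b => pvNullB a || pvNullB b
  | .cat a b => pvNullB a && pvNullB b
  | .star _ _ => true

def pvD : Rx → List Char → Rx
  | .sym t, s => .sym (if t = s then "eps".toList else "Null".toList)
  | .alt a b, s => .alt (pvD a s) (pvD b s)
  | .cat a b, s => if pvNullB a then .alt (.cat (pvD a s) b) (pvD b s) else .cat (pvD a s) b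
  | .star c ch, s => .cat (pvD c s) (.star c ch)

def pvSer : Rx → List Char
  | .sym t => t
  | .alt a b => pvSer a ++ '|' :: pvSer b
  | .cat a b => pvSer a ++ '.' :: pvSer b
  | .star c ch => pvSer c ++ [ch]

def der_by_symbol_alt (regex : String) (s : String) : String :=
  String.ofList (pvSer (pvD (pvParse regex.toList) s.toList))

-- ===== PRECONDITION & SPEC =====
def Spec_der_by_symbol (regex : String) (s : String) (out : String) : Prop := out = der_by_symbol_alt regex s
instance (regex : String) (s : String) (out : String) : Decidable (Spec_der_by_symbol regex s out) := by unfold Spec_der_by_symbol; infer_instance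

-- ===== CLAIM (what is proved, stated in full; the proofs are below) =====
def Claim_equal_der_by_symbol : Prop := ∀ (regex : String) (s : String), Dom_der_by_symbol regex s → Spec_der_by_symbol regex s (der_by_symbol regex s)

-- ===== LEMMAS AND PROOFS =====

theorem pvSplit1_append (c : Char) (l : List Char) (h : c ∈ l) :
    (pvSplit1 c l).1 ++ c :: (pvSplit1 c l).2 = l := by
  induction l with
  | nil => cases h
  | cons x xs ih =>
    by_cases hx : x = c
    · simp [pvSplit1, hx]
    · simp only [List.mem_cons] at h
      rcases h with h | h
      · exact absurd h.symm hx
      · simpa [pvSplit1, hx] using ih h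

theorem dropLast_append_getLastD (l : List Char) (h : l ≠ []) :
    l.dropLast ++ [l.getLastD ' '] = l := by
  cases l using List.reverseRecOn with
  | nil => simp at h
  | append_singleton xs x => simp

theorem pvStarNe (l : List Char) (h0 : ¬¬('.' ∈ l ∨ '|' ∈ l ∨ '*' ∈ l))
    (h1 : '|' ∉ l) (h2 : '.' ∉ l) : l ≠ [] :=
  List.ne_nil_of_mem (pvStarMem l h0 h1 h2)

theorem roundtrip (l : List Char) : pvSer (pvParse l) = l := by
  induction l using pvParse.induct with
  | case1 l h0 => rw [pvParse, dif_pos h0, pvSer]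
  | case2 l h0 h1 ih1 ih2 =>
    rw [pvParse, dif_neg h0, dif_pos h1]
    simp only [pvSer, ih1, ih2]
    exact pvSplit1_append _ _ h1
  | case3 l h0 h1 h2 ih1 ih2 =>
    rw [pvParse, dif_neg h0, dif_neg h1, dif_pos h2]
    simp only [pvSer, ih1, ih2]
    exact pvSplit1_append _ _ h2
  | case4 l h0 h1 h2 ih =>
    rw [pvParse, dif_neg h0, dif_neg h1, dif_neg h2]
    simp only [pvSer, ih]
    exact dropLast_append_getLastD l (pvStarNe l h0 h1 h2)

theorem eps_no_ops : ¬('.' ∈ "eps".toList ∨ '|' ∈ "eps".toList ∨ '*' ∈ "eps".toList) := by decide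

theorem nullEq (l : List Char) : pvNullB (pvParse l) = pvNullA l := by
  induction l using pvParse.induct with
  | case1 l h0 =>
    rw [pvParse, dif_pos h0, pvNullA]
    by_cases he : l = "eps".toList <;> simp [he, pvNullB, h0]
  | case2 l h0 h1 ih1 ih2 =>
    have hne : l ≠ "eps".toList := fun he => eps_no_ops (by rw [← he]; tauto)
    rw [pvParse, dif_neg h0, dif_pos h1, pvNullA, if_neg hne]
    simp [h1, pvNullB, ih1, ih2]
  | case3 l h0 h1 h2 ih1 ih2 =>
    have hne : l ≠ "eps".toList := fun he => eps_no_ops (by rw [← he]; tauto)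
    rw [pvParse, dif_neg h0, dif_neg h1, dif_pos h2, pvNullA, if_neg hne]
    simp [h1, h2, pvNullB, ih1, ih2]
  | case4 l h0 h1 h2 ih =>
    have hne : l ≠ "eps".toList := fun he => eps_no_ops (by rw [← he]; tauto)
    have hs := pvStarMem l h0 h1 h2
    rw [pvParse, dif_neg h0, dif_neg h1, dif_neg h2, pvNullA, if_neg hne]
    simp [hs, h1, h2, pvNullB]

theorem mainEq (s : List Char) (l : List Char) : pvSer (pvD (pvParse l) s) = pvDerA l s := by
  induction l using pvParse.induct with
  | case1 l h0 =>
    rw [pvParse, dif_pos h0, pvDerA, dif_pos h0]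
    by_cases he : l = s <;> simp [he, pvD, pvSer]
  | case2 l h0 h1 ih1 ih2 =>
    rw [pvParse, dif_neg h0, dif_pos h1, pvDerA, dif_neg h0, dif_pos h1]
    simp [pvD, pvSer, ih1, ih2]
  | case3 l h0 h1 h2 ih1 ih2 =>
    rw [pvParse, dif_neg h0, dif_neg h1, dif_pos h2, pvDerA, dif_neg h0, dif_neg h1, dif_pos h2]
    simp only [pvD, nullEq]
    by_cases hn : pvNullA (pvSplit1 '.' l).1
    · simp [hn, pvSer, ih1, ih2, roundtrip]
    · simp [hn, pvSer, ih1, roundtrip]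
  | case4 l h0 h1 h2 ih =>
    rw [pvParse, dif_neg h0, dif_neg h1, dif_neg h2, pvDerA, dif_neg h0, dif_neg h1, dif_neg h2]
    simp only [pvD, pvSer, ih]
    rw [roundtrip, dropLast_append_getLastD l (pvStarNe l h0 h1 h2)]

-- ===== VERDICT (by name: the statement is the Claim_ definition above) =====
theorem der_by_symbol_spec : Claim_equal_der_by_symbol := by
  intro regex s _
  unfold Spec_der_by_symbol der_by_symbol der_by_symbol_alt
  rw [mainEq]
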